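-- pv_equiv track=rewrite | github.com/TengFeiyang01/Algorithm | ACODE/sk_au_24/d.py | count_modules
-- ===== SOURCE A (Python) =====
-- def count_modules(n):
--     MOD = 10**9 + 7
--
--     dp = [[0] * 2 for _ in range(n + 1)]
--
--     dp[2][0] = 1  # TI -> T
--     dp[2][1] = 1  # TI -> I
--
--     for i in range(3, n + 1):
--         dp[i][0] = (dp[i-1][0] + dp[i-1][1]) % MOD  # T
--         dp[i][1] = dp[i-1][0] % MOD                # I
--
--     return (dp[n][0] + dp[n][1]) % MOD
-- ===== SOURCE B (Python) =====
-- def count_modules(n):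
--     MOD = 10**9 + 7
--
--     # fast doubling: returns (F(k) % MOD, F(k+1) % MOD) with F(0)=0, F(1)=1
--     def fib_pair(k):
--         if k == 0:
--             return (0, 1)
--         a, b = fib_pair(k >> 1)
--         c = a * (2 * b - a) % MOD
--         d = (a * a + b * b) % MOD
--         if k & 1:
--             return (d, (c + d) % MOD)
--         return (c, d)
--
--     if n < 0:
--         return 0
--     return fib_pair(n + 1)[0]
-- ===== Notes on version B (the rewrite author's own statement) =====
-- stated objective: faster
-- what changed: Replaced the O(n) two-state DP table with fast-doubling Fibonacci (F(2k), F(2k+1) identities) computing fib(n+1) mod 1e9+7 in O(log n).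
import Mathlib
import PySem

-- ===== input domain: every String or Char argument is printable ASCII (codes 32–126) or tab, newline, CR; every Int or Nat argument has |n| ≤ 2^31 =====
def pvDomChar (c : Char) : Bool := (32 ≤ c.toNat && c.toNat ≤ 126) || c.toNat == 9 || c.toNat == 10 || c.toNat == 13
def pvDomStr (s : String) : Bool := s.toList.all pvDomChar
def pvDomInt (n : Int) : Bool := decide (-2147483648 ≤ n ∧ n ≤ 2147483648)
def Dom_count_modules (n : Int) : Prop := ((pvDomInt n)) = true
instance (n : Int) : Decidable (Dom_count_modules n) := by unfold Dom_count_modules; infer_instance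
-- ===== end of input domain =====

-- B replaces A's O(n) linear DP by O(log n) fast-doubling Fibonacci mod 10^9+7; equal on all n ≥ 2 (A raises IndexError for n < 2).

-- ===== PORT A =====
-- loop body of A's 'for i in range(3, n+1)' (dp rows [t, i] become pairs)
def stepA (dp : List (Int × Int)) (i : Int) : List (Int × Int) :=
  let prev := PySem.List.pyGetD dp (i - 1) ((0 : Int), (0 : Int))
  PySem.List.pySetD dp i
    (PySem.Int.mod (prev.1 + prev.2) (10 ^ 9 + 7), PySem.Int.mod prev.1 (10 ^ 9 + 7))

def count_modules (n : Int) : Int :=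
  let dp : List (Int × Int) := List.replicate (n + 1).toNat ((0 : Int), (0 : Int))
  let dp := PySem.List.pySetD dp 2 ((1 : Int), (1 : Int))   -- dp[2][0] = 1; dp[2][1] = 1
  let dp := (PySem.List.pyRange 3 (n + 1) 1).foldl stepA dp
  let last := PySem.List.pyGetD dp n ((0 : Int), (0 : Int))
  PySem.Int.mod (last.1 + last.2) (10 ^ 9 + 7)

-- ===== PORT B =====
-- fast doubling: (F(k) % MOD, F(k+1) % MOD)
def fibPair (k : Nat) : Int × Int :=
  if h : k = 0 then ((0 : Int), (1 : Int))
  else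
    let p := fibPair (k >>> 1)
    let a := p.1
    let b := p.2
    let c := PySem.Int.mod (a * (2 * b - a)) (10 ^ 9 + 7)
    let d := PySem.Int.mod (a * a + b * b) (10 ^ 9 + 7)
    if k &&& 1 = 1 then (d, PySem.Int.mod (c + d) (10 ^ 9 + 7)) else (c, d)
termination_by k
decreasing_by simp only [Nat.shiftRight_one]; omega

def count_modules_alt (n : Int) : Int :=
  if n < 0 then 0 else (fibPair (n + 1).toNat).1

-- ===== PRECONDITION & SPEC =====
-- A raises IndexError for every n < 2 (dp[2] does not exist); Pre_ is exactly where A returns.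
def Pre_count_modules (n : Int) : Prop := 2 ≤ n
instance (n : Int) : Decidable (Pre_count_modules n) := by unfold Pre_count_modules; infer_instance
def pvWitness_count_modules : Int := 5

def Spec_count_modules (n : Int) (out : Int) : Prop := out = count_modules_alt n
instance (n : Int) (out : Int) : Decidable (Spec_count_modules n out) := by unfold Spec_count_modules; infer_instance

-- ===== CLAIM (what is proved, stated in full; the proofs are below) =====
def Claim_equal_count_modules : Prop := ∀ (n : Int), Dom_count_modules n → Pre_count_modules n → Spec_count_modules n (count_modules n)

-- ===== LEMMAS AND PROOFS =====

def fibm (k : Nat) : Int := (Nat.fib k : Int) % (10 ^ 9 + 7)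

lemma mod_eq_emod (x : Int) : PySem.Int.mod x (10 ^ 9 + 7) = x % (10 ^ 9 + 7) :=
  PySem.Int.mod_eq_emod_of_pos (by norm_num)

lemma self_emod (k : Nat) : fibm k % (10 ^ 9 + 7) = fibm k := Int.emod_emod_of_dvd _ dvd_rfl

lemma fibm_modeq (k : Nat) : fibm k ≡ (Nat.fib k : Int) [ZMOD (10 ^ 9 + 7)] :=
  Int.emod_emod_of_dvd _ dvd_rfl

lemma c_eq (m : Nat) :
    (fibm m * (2 * fibm (m + 1) - fibm m)) % (10 ^ 9 + 7) = fibm (2 * m) := by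
  have hle : Nat.fib m ≤ 2 * Nat.fib (m + 1) :=
    le_trans (Nat.fib_le_fib_succ) (by omega)
  have h2 : (Nat.fib (2 * m) : Int) = (Nat.fib m : Int) * (2 * Nat.fib (m + 1) - Nat.fib m) := by
    have := Nat.fib_two_mul m
    have hcast : ((Nat.fib m * (2 * Nat.fib (m + 1) - Nat.fib m) : Nat) : Int)
        = (Nat.fib m : Int) * (2 * Nat.fib (m + 1) - Nat.fib m) := by
      push_cast [Nat.cast_sub hle]; ring
    rw [this, hcast]
  have hmod : fibm m * (2 * fibm (m + 1) - fibm m)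
      ≡ (Nat.fib m : Int) * (2 * (Nat.fib (m + 1) : Int) - Nat.fib m) [ZMOD (10 ^ 9 + 7)] :=
    (fibm_modeq m).mul (((fibm_modeq (m + 1)).mul_left 2).sub (fibm_modeq m))
  calc (fibm m * (2 * fibm (m + 1) - fibm m)) % (10 ^ 9 + 7)
      = ((Nat.fib m : Int) * (2 * (Nat.fib (m + 1) : Int) - Nat.fib m)) % (10 ^ 9 + 7) := hmod
    _ = fibm (2 * m) := by rw [fibm, h2]

lemma d_eq (m : Nat) :
    (fibm m * fibm m + fibm (m + 1) * fibm (m + 1)) % (10 ^ 9 + 7) = fibm (2 * m + 1) := by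
  have h2 : (Nat.fib (2 * m + 1) : Int)
      = (Nat.fib m : Int) * Nat.fib m + (Nat.fib (m + 1) : Int) * Nat.fib (m + 1) := by
    have := Nat.fib_two_mul_add_one m
    push_cast [this]; ring
  have hmod : fibm m * fibm m + fibm (m + 1) * fibm (m + 1)
      ≡ (Nat.fib m : Int) * Nat.fib m + (Nat.fib (m + 1) : Int) * Nat.fib (m + 1)
        [ZMOD (10 ^ 9 + 7)] :=
    ((fibm_modeq m).mul (fibm_modeq m)).add ((fibm_modeq (m + 1)).mul (fibm_modeq (m + 1)))
  calc (fibm m * fibm m + fibm (m + 1) * fibm (m + 1)) % (10 ^ 9 + 7)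
      = ((Nat.fib m : Int) * Nat.fib m + (Nat.fib (m + 1) : Int) * Nat.fib (m + 1)) % (10 ^ 9 + 7) := hmod
    _ = fibm (2 * m + 1) := by rw [fibm, h2]

lemma add_eq (j : Nat) : (fibm j + fibm (j + 1)) % (10 ^ 9 + 7) = fibm (j + 2) := by
  have h2 : (Nat.fib (j + 2) : Int) = (Nat.fib j : Int) + Nat.fib (j + 1) := by
    rw [Nat.fib_add_two]; push_cast; ring
  have hmod : fibm j + fibm (j + 1) ≡ (Nat.fib j : Int) + Nat.fib (j + 1) [ZMOD (10 ^ 9 + 7)] :=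
    (fibm_modeq j).add (fibm_modeq (j + 1))
  calc (fibm j + fibm (j + 1)) % (10 ^ 9 + 7)
      = ((Nat.fib j : Int) + Nat.fib (j + 1)) % (10 ^ 9 + 7) := hmod
    _ = fibm (j + 2) := by rw [fibm, h2]

lemma fibPair_eq (k : Nat) : fibPair k = (fibm k, fibm (k + 1)) := by
  induction k using Nat.strong_induction_on with
  | _ k ih =>
    rw [fibPair]
    by_cases hk : k = 0
    · subst hk; decide
    · simp only [dif_neg hk]
      have hlt : k >>> 1 < k := by simp only [Nat.shiftRight_one]; omega
      rw [ih _ hlt]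
      simp only [Nat.shiftRight_one, Nat.and_one_is_mod, mod_eq_emod]
      set m := k / 2 with hm
      by_cases hp : k % 2 = 1
      · have hk2 : k = 2 * m + 1 := by omega
        simp only [hp]
        rw [c_eq, d_eq, hk2]
        simp only [if_true, show 2 * m + 1 + 1 = 2 * m + 2 from rfl, ← add_eq (2 * m)]
      · have hk2 : k = 2 * m := by omega
        simp only [hp]
        rw [c_eq, d_eq, hk2]
        simp only [if_false]

lemma pySetD_natCast' (xs : List (Int × Int)) (j : Nat) (v : Int × Int) (h : j < xs.length) :
    PySem.List.pySetD xs (j : Int) v = xs.set j v := by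
  simp [PySem.List.pySetD, PySem.List.pySet?_natCast xs j v h]

lemma getD_set_self' (l : List (Int × Int)) (j : Nat) (x d : Int × Int) (h : j < l.length) :
    (l.set j x).getD j d = x := by
  simp [List.getD, h]

lemma stepA_eq (dp : List (Int × Int)) (i : Nat) (h2 : 1 ≤ i) (hlen : i + 1 < dp.length)
    (hdp : dp.getD i ((0 : Int), (0 : Int)) = (fibm i, fibm (i - 1))) :
    stepA dp ((i + 1 : Nat) : Int) = dp.set (i + 1) (fibm (i + 1), fibm i) := by
  unfold stepA
  have h1 : (((i + 1 : Nat) : Int) - 1) = ((i : Nat) : Int) := by push_cast; ring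
  rw [h1]
  simp only [PySem.List.pyGetD_natCast, hdp]
  rw [pySetD_natCast' dp (i + 1) _ hlen]
  congr 1
  simp only [mod_eq_emod, Prod.mk.injEq]
  constructor
  · have e1 : i - 1 + 1 = i := by omega
    have e2 : i - 1 + 2 = i + 1 := by omega
    calc (fibm i + fibm (i - 1)) % (10 ^ 9 + 7)
        = (fibm (i - 1) + fibm (i - 1 + 1)) % (10 ^ 9 + 7) := by rw [e1, add_comm]
      _ = fibm (i - 1 + 2) := add_eq (i - 1)
      _ = fibm (i + 1) := by rw [e2]
  · exact self_emod i

lemma loopA : ∀ (k i : Nat) (dp : List (Int × Int)), 2 ≤ i → i + k < dp.length →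
    dp.getD i ((0 : Int), (0 : Int)) = (fibm i, fibm (i - 1)) →
    ((PySem.List.pyRange ((i : Int) + 1) ((i : Int) + (k : Int) + 1) 1).foldl stepA dp).getD
        (i + k) ((0 : Int), (0 : Int)) = (fibm (i + k), fibm (i + k - 1)) := by
  intro k
  induction k with
  | zero =>
    intro i dp _ _ hdp
    rw [PySem.List.pyRange_one_eq_nil (by omega)]
    simpa using hdp
  | succ k ih =>
    intro i dp h2 hlen hdp
    rw [PySem.List.pyRange_one_cons (by push_cast; omega)]
    simp only [List.foldl_cons]
    have hcast1 : (i : Int) + 1 = ((i + 1 : Nat) : Int) := by push_cast; ring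
    have hcast2 : (i : Int) + ((k + 1 : Nat) : Int) + 1 = ((i + 1 : Nat) : Int) + ((k : Nat) : Int) + 1 := by
      push_cast; ring
    rw [hcast1, hcast2]
    rw [stepA_eq dp i (by omega) (by omega) hdp]
    have e1 : i + (k + 1) = (i + 1) + k := by omega
    rw [e1]
    exact ih (i + 1) (dp.set (i + 1) (fibm (i + 1), fibm i)) (by omega)
      (by rw [List.length_set]; omega)
      (by rw [getD_set_self' _ _ _ _ (by omega)]; simp)

-- ===== VERDICT (by name: the statement is the Claim_ definition above) =====
theorem count_modules_spec : Claim_equal_count_modules := by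
  unfold Claim_equal_count_modules Spec_count_modules Pre_count_modules
  intro n _ hn
  obtain ⟨N, rfl⟩ : ∃ N : Nat, n = (N : Int) := ⟨n.toNat, (Int.toNat_of_nonneg (by omega)).symm⟩
  have hN : 2 ≤ N := by exact_mod_cast hn
  simp only [count_modules, count_modules_alt]
  have htn : ((N : Int) + 1).toNat = N + 1 := by omega
  rw [htn]
  have h2c : (2 : Int) = ((2 : Nat) : Int) := rfl
  rw [h2c, pySetD_natCast' _ 2 _ (by rw [List.length_replicate]; omega)]
  have h3c : (3 : Int) = (((2 : Nat)) : Int) + 1 := by norm_num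
  have hstop : (N : Int) + 1 = ((2 : Nat) : Int) + ((N - 2 : Nat) : Int) + 1 := by
    push_cast [Nat.cast_sub hN]; ring
  rw [h3c, hstop]
  have hinit : ((List.replicate (N + 1) ((0 : Int), (0 : Int))).set 2 (1, 1)).getD 2
      ((0 : Int), (0 : Int)) = (fibm 2, fibm 1) := by
    rw [getD_set_self' _ _ _ _ (by rw [List.length_replicate]; omega)]
    decide
  have hloop := loopA (N - 2) 2 _ (le_refl 2)
    (by rw [List.length_set, List.length_replicate]; omega) hinit
  have e2 : 2 + (N - 2) = N := by omega
  rw [e2] at hloop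
  rw [show ((N : Int)) = ((N : Nat) : Int) from rfl, PySem.List.pyGetD_natCast, hloop]
  simp only [mod_eq_emod]
  have hne : ¬ ((N : Int) < 0) := by omega
  rw [if_neg hne, fibPair_eq]
  have eN : N = (N - 1) + 1 := by omega
  have eN2 : N + 1 = (N - 1) + 2 := by omega
  calc (fibm N + fibm (N - 1)) % (10 ^ 9 + 7)
      = (fibm (N - 1) + fibm (N - 1 + 1)) % (10 ^ 9 + 7) := by rw [← eN, add_comm]
    _ = fibm (N - 1 + 2) := add_eq (N - 1)
    _ = (fibm (N + 1), fibm (N + 1 + 1)).1 := by rw [← eN2]
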